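-- pv_equiv track=rewrite | github.com/lreicher/TetrisTrainer | tetris.py | checkOverhang
-- ===== SOURCE A (Python) =====
-- BOARDHEIGHT = 20
--
-- BLANK = '.'
--
-- def checkOverhang(board, x):
--     # Return True if the column has a gap with tetriminos above and below it.
--     blank = False
--     block = False
--     for y in range(BOARDHEIGHT):
--         if board[x][y] == BLANK:
--             blank = True
--             block = False
--         else:
--             block = True
--         if blank and block:
--             return True
--     return False
-- ===== SOURCE B (Python) =====
-- BOARDHEIGHT = 20
--
-- BLANK = '.'
--
-- def checkOverhang(board, x):
--     # Locate the first blank in the column's first BOARDHEIGHT cells,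
--     # then report whether any later cell is occupied.
--     col = board[x][:BOARDHEIGHT]
--     try:
--         i = col.index(BLANK)
--     except ValueError:
--         return False
--     return any(c != BLANK for c in col[i + 1:])
-- ===== Notes on version B (the rewrite author's own statement) =====
-- stated objective: simpler
-- what changed: Replaces the latching two-flag state machine over y in range(20) with a direct decomposition: slice the column's first 20 cells, find the first blank with list.index, and test any() for a non-blank after it.
import Mathlib
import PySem

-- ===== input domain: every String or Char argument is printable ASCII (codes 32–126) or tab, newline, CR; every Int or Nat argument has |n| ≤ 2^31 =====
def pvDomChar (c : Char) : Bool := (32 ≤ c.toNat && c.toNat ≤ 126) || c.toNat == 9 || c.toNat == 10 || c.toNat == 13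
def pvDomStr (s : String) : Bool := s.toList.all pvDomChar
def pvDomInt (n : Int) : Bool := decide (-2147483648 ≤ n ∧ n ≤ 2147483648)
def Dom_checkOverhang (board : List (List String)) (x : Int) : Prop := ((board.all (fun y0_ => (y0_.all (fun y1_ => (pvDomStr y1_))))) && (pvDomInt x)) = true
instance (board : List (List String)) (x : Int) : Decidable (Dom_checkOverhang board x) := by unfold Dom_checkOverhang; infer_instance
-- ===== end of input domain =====

-- B replaces A's latching two-flag scan with find-first-blank-then-scan-the-rest (simpler decomposition, same cost).

-- ===== PORT A =====
-- the for-loop over range(BOARDHEIGHT) with early return, state (blank, block)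
def checkOverhangLoopA (col : List String) (blank block : Bool) (ys : List Int) : Bool :=
  match ys with
  | [] => false
  | y :: rest =>
    let cell := PySem.List.pyGetD col y ""
    let blank2 := if cell = "." then true else blank
    let block2 := if cell = "." then false else true
    if blank2 && block2 then true
    else checkOverhangLoopA col blank2 block2 rest

def checkOverhang (board : List (List String)) (x : Int) : Bool :=
  let col := PySem.List.pyGetD board x []
  checkOverhangLoopA col false false (PySem.List.pyRange 0 20 1)

-- ===== PORT B =====
def checkOverhang_alt (board : List (List String)) (x : Int) : Bool :=
  let col := PySem.List.slice (PySem.List.pyGetD board x []) none (some 20)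
  match PySem.List.index? col "." with
  | none => false
  | some i => (PySem.List.slice col (some ((i : Int) + 1)) none).any (fun c => c != ".")

-- ===== PRECONDITION & SPEC =====
-- Pre_ excludes exactly the inputs where A raises IndexError: an out-of-range x, or a column
-- shorter than 20 on which the loop never returns early (no blank cell followed by a non-blank one).
def Pre_checkOverhang (board : List (List String)) (x : Int) : Prop :=
  PySem.Raise.InRange board.length x ∧
  (20 ≤ (PySem.List.pyGetD board x []).length ∨
    ∃ j < (PySem.List.pyGetD board x []).length,
      (PySem.List.pyGetD board x []).getD j "" ≠ "." ∧
      ∃ i < j, (PySem.List.pyGetD board x []).getD i "" = ".")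
instance (board : List (List String)) (x : Int) : Decidable (Pre_checkOverhang board x) := by
  unfold Pre_checkOverhang; infer_instance
def pvWitness_checkOverhang : List (List String) × Int := ([[".", "X"]], 0)

def Spec_checkOverhang (board : List (List String)) (x : Int) (out : Bool) : Prop := out = checkOverhang_alt board x
instance (board : List (List String)) (x : Int) (out : Bool) : Decidable (Spec_checkOverhang board x out) := by unfold Spec_checkOverhang; infer_instance

-- ===== CLAIM (what is proved, stated in full; the proofs are below) =====
def Claim_equal_checkOverhang : Prop := ∀ (board : List (List String)) (x : Int), Dom_checkOverhang board x → Pre_checkOverhang board x → Spec_checkOverhang board x (checkOverhang board x)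

-- ===== LEMMAS AND PROOFS =====

-- the column scan with the dead 'block' flag removed: state is just 'blank'
def lloop : List String → Bool → Bool
  | [], _ => false
  | c :: rest, blank =>
    if c = "." then lloop rest true
    else if blank then true else lloop rest false

theorem lloop_true (l : List String) : lloop l true = l.any (fun c => c != ".") := by
  induction l with
  | nil => rfl
  | cons c rest ih =>
    by_cases h : c = "." <;> simp [lloop, h, ih]

-- A's loop over range(a,20) equals lloop on the cells it would read
theorem loopA_eq (cells : List String) : ∀ (col : List String) (a : Nat) (blank block : Bool),
    (∀ k (hk : k < cells.length), cells[k] = col.getD (a + k) "") →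
    a + cells.length = 20 →
    checkOverhangLoopA col blank block (PySem.List.pyRange a 20 1) = lloop cells blank := by
  induction cells with
  | nil =>
    intro col a blank block _ hlen
    simp only [List.length_nil] at hlen
    rw [PySem.List.pyRange_one_eq_nil (by omega)]
    rfl
  | cons c rest ih =>
    intro col a blank block hget hlen
    simp only [List.length_cons] at hlen
    rw [PySem.List.pyRange_one_cons (by omega : (a : Int) < 20)]
    have hc : c = col.getD a "" := by simpa using hget 0 (by simp)
    have hcell : PySem.List.pyGetD col (a : Int) "" = col.getD a "" := by
      simp [PySem.List.pyGetD_natCast]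
    have ihrest : ∀ blank block, checkOverhangLoopA col blank block (PySem.List.pyRange ((a : Int) + 1) 20 1) = lloop rest blank := by
      intro blank block
      have hca : ((a : Int) + 1) = ((a + 1 : Nat) : Int) := by push_cast; ring
      rw [hca]
      apply ih col (a + 1) blank block
      · intro k hk
        have := hget (k + 1) (by simpa using Nat.succ_lt_succ hk)
        simpa [Nat.add_assoc, Nat.add_comm 1 k] using this
      · omega
    by_cases h : c = "."
    · simp only [checkOverhangLoopA, hcell, ← hc, h, lloop]
      simp [ihrest]
    · simp only [checkOverhangLoopA, hcell, ← hc, if_neg h, lloop]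
      cases blank <;> simp [ihrest]

-- the padded cells A reads: the first 20 entries of col, "" past the end
def pad20 (col : List String) : List String :=
  col.take 20 ++ List.replicate (20 - col.length) ""

theorem pad20_length (col : List String) : (pad20 col).length = 20 := by
  simp [pad20]; omega

theorem pad20_get (col : List String) (k : Nat) (hk : k < (pad20 col).length) :
    (pad20 col)[k] = col.getD k "" := by
  have hk20 : k < 20 := by rwa [pad20_length] at hk
  unfold pad20 at hk ⊢
  by_cases h : k < col.length
  · have ht : k < (col.take 20).length := by simp; omega
    rw [List.getElem_append_left ht, List.getElem_take, List.getD_eq_getElem _ _ h]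
  · have ht : (col.take 20).length ≤ k := by simp; omega
    rw [List.getElem_append_right ht]
    simp [List.getD_eq_getElem?_getD, List.getElem?_eq_none (by omega : col.length ≤ k)]

theorem checkOverhang_eq_lloop (board : List (List String)) (x : Int) :
    checkOverhang board x = lloop (pad20 (PySem.List.pyGetD board x [])) false := by
  unfold checkOverhang
  exact loopA_eq _ _ 0 false false (fun k hk => by simpa using pad20_get _ k hk)
    (by simp [pad20_length])

-- B's match-form equals lloop on its (unpadded, truncated) column
theorem alt_match_eq_lloop (t : List String) :
    (match PySem.List.index? t "." with
     | none => false
     | some i => (PySem.List.slice t (some ((i : Int) + 1)) none).any (fun c => c != ".")) =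
    lloop t false := by
  induction t with
  | nil => rfl
  | cons c rest ih =>
    by_cases h : c = "."
    · subst h
      rw [PySem.List.index?_cons_self]
      have hs : PySem.List.slice ("." :: rest) (some (((0 : Nat) : Int) + 1)) none = rest := by
        rw [PySem.List.slice_from _ (by norm_num)]
        rfl
      simp only [hs, lloop, lloop_true]
      simp
    · rw [PySem.List.index?_cons_of_ne rest h]
      cases hi : PySem.List.index? rest "." with
      | none =>
        simp only [Option.map_none]
        rw [hi] at ih
        simp only [lloop, if_neg h, Bool.false_eq_true, if_false]
        exact ih
      | some i =>
        simp only [Option.map_some]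
        rw [hi] at ih
        have hs : PySem.List.slice (c :: rest) (some (((i + 1 : Nat) : Int) + 1)) none =
            PySem.List.slice rest (some (((i : Nat) : Int) + 1)) none := by
          rw [PySem.List.slice_from _ (by positivity), PySem.List.slice_from _ (by positivity)]
          have h1 : (((i + 1 : Nat) : Int) + 1).toNat = i + 2 := by omega
          have h2 : (((i : Nat) : Int) + 1).toNat = i + 1 := by omega
          rw [h1, h2]
          rfl
        rw [hs, lloop, if_neg h]
        simp only [Bool.false_eq_true, if_false]
        exact ih

theorem checkOverhang_alt_eq_lloop (board : List (List String)) (x : Int) :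
    checkOverhang_alt board x = lloop ((PySem.List.pyGetD board x []).take 20) false := by
  unfold checkOverhang_alt
  have hs : PySem.List.slice (PySem.List.pyGetD board x []) none (some 20) =
      (PySem.List.pyGetD board x []).take 20 := by
    rw [PySem.List.slice_to _ (by norm_num)]; rfl
  rw [hs]
  exact alt_match_eq_lloop _

-- a blank followed by a later non-blank forces a True result
theorem lloop_ex (l : List String) : ∀ (blank : Bool),
    (∃ j, ∃ _ : j < l.length, l[j] ≠ "." ∧ (blank = true ∨ ∃ i, ∃ _ : i < j, l[i] = ".")) →
    lloop l blank = true := by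
  induction l with
  | nil => rintro blank ⟨j, hj, _⟩; exact absurd hj (by simp)
  | cons c rest ih =>
    rintro blank ⟨j, hj, hnb, hcond⟩
    by_cases h : c = "."
    · have hj0 : j ≠ 0 := by rintro rfl; exact hnb (by simpa using h)
      obtain ⟨j', rfl⟩ := Nat.exists_eq_succ_of_ne_zero hj0
      rw [lloop, if_pos h]
      exact ih true ⟨j', by simpa using Nat.lt_of_succ_lt_succ hj, by simpa using hnb, Or.inl rfl⟩
    · rw [lloop, if_neg h]
      cases blank with
      | true => simp
      | false =>
        rcases hcond with hb | ⟨i, hi, hblank⟩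
        · exact absurd hb (by simp)
        · have hi0 : i ≠ 0 := by rintro rfl; exact h (by simpa using hblank)
          obtain ⟨i', rfl⟩ := Nat.exists_eq_succ_of_ne_zero hi0
          have hj0 : j ≠ 0 := by omega
          obtain ⟨j', rfl⟩ := Nat.exists_eq_succ_of_ne_zero hj0
          simp only [Bool.false_eq_true, if_false]
          exact ih false ⟨j', by simpa using Nat.lt_of_succ_lt_succ hj, by simpa using hnb,
            Or.inr ⟨i', Nat.lt_of_succ_lt_succ hi, by simpa using hblank⟩⟩

-- ===== VERDICT (by name: the statement is the Claim_ definition above) =====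
theorem checkOverhang_spec : Claim_equal_checkOverhang := by
  unfold Claim_equal_checkOverhang
  intro board x _ hpre
  unfold Spec_checkOverhang
  obtain ⟨_, hpre2⟩ := hpre
  set col := PySem.List.pyGetD board x [] with hcol
  rw [checkOverhang_eq_lloop, checkOverhang_alt_eq_lloop, ← hcol]
  by_cases hlen : 20 ≤ col.length
  · -- column long enough: no padding, both scan the same 20 cells
    unfold pad20
    have : 20 - col.length = 0 := by omega
    rw [this]
    simp
  · -- short column: Pre_ supplies a blank with a later non-blank, so both sides are True
    rcases hpre2 with h | ⟨j, hj, hnb, i, hi, hblank⟩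
    · omega
    have h20 : col.take 20 = col := List.take_of_length_le (by omega)
    rw [h20]
    have hjcol : col[j]'hj ≠ "." := by rwa [List.getD_eq_getElem _ _ hj] at hnb
    have hicol : col[i]'(by omega) = "." := by
      rwa [List.getD_eq_getElem _ _ (by omega)] at hblank
    have hA : lloop (pad20 col) false = true := by
      refine lloop_ex _ false ⟨j, ?_, ?_, Or.inr ⟨i, hi, ?_⟩⟩
      · rw [pad20_length]; omega
      · rw [pad20_get _ _ (by rw [pad20_length]; omega)]; exact hnb
      · rw [pad20_get _ _ (by rw [pad20_length]; omega)]; exact hblank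
    have hB : lloop col false = true :=
      lloop_ex _ false ⟨j, hj, hjcol, Or.inr ⟨i, hi, hicol⟩⟩
    rw [hA, hB]
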